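-- pv_equiv track=rewrite | github.com/papanokechi/wallis-pcf-lean4 | relay_round10c_A1_precision.py | compute_pk
-- ===== SOURCE A (Python) =====
-- def sigma1(j):
--     s, d = 0, 1
--     while d*d <= j:
--         if j % d == 0:
--             s += d
--             if d != j//d: s += j//d
--         d += 1
--     return s
--
-- def compute_pk(N, k):
--     sig = [0]*(N+1)
--     for j in range(1, N+1): sig[j] = k * sigma1(j)
--     pk = [0]*(N+1); pk[0] = 1
--     for n in range(1, N+1):
--         s = 0
--         for j in range(1, n+1): s += sig[j]*pk[n-j]
--         pk[n] = s // n
--     return pk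
-- ===== SOURCE B (Python) =====
-- def compute_pk(N, k):
--     sig = [0] * (N + 1)
--     for d in range(1, N + 1):
--         for m in range(d, N + 1, d):
--             sig[m] += d
--     pk = [0] * (N + 1)
--     pk[0] = 1
--     for n in range(1, N + 1):
--         s = 0
--         for j in range(1, n + 1):
--             s += k * sig[j] * pk[n - j]
--         pk[n] = s // n
--     return pk
-- ===== Notes on version B (the rewrite author's own statement) =====
-- stated objective: alternative
-- what changed: B replaces the per-j trial-division sigma1 helper (loop to sqrt(j)) with a single divisor sieve that adds each d to all its multiples, and folds the factor k into the convolution instead of pre-scaling the sigma table; the O(N^2) convolution recurrence dominates both, so no speed claim.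
import Mathlib
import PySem

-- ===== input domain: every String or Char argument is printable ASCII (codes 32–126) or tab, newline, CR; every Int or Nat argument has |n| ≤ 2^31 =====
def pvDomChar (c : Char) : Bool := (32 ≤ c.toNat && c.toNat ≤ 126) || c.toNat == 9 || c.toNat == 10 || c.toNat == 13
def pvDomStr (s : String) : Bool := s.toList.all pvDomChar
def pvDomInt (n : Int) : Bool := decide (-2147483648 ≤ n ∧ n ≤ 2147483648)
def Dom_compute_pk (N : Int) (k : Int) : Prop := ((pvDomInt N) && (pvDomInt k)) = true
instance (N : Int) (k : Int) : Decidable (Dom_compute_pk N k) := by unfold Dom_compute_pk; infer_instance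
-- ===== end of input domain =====

-- B replaces the per-j trial-division sigma1 helper with a single divisor sieve over multiples
-- and folds the factor k into the convolution; alternative (the O(N^2) convolution dominates both).

-- ===== PORT A =====
-- while d*d <= j: … d += 1   (fuel j.toNat+1 strictly exceeds the number of iterations: d starts at 1
-- and the loop stops once d > j; the loop body is transcribed step for step)
def sigma1Go (j : Int) (s : Int) (d : Int) : Nat → Int
  | 0 => s
  | fuel + 1 =>
    if d * d ≤ j then
      sigma1Go j
        (if PySem.Int.mod j d = 0 then
          (if d ≠ PySem.Int.floordiv j d then s + d + PySem.Int.floordiv j d else s + d)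
         else s)
        (d + 1) fuel
    else s

def sigma1 (j : Int) : Int := sigma1Go j 0 1 (j.toNat + 1)

def compute_pk (N : Int) (k : Int) : List Int :=
  let sig := (PySem.List.pyRange 1 (N + 1) 1).foldl
      (fun sig j => PySem.List.pySetD sig j (k * sigma1 j))
      (List.replicate (N + 1).toNat 0)
  let pk := (PySem.List.pyRange 1 (N + 1) 1).foldl
      (fun pk n =>
        let s := (PySem.List.pyRange 1 (n + 1) 1).foldl
            (fun s j => s + PySem.List.pyGetD sig j 0 * PySem.List.pyGetD pk (n - j) 0) 0
        PySem.List.pySetD pk n (PySem.Int.floordiv s n))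
      (PySem.List.pySetD (List.replicate (N + 1).toNat 0) 0 1)
  pk

-- ===== PORT B =====
def compute_pk_alt (N : Int) (k : Int) : List Int :=
  let sig := (PySem.List.pyRange 1 (N + 1) 1).foldl
      (fun sig d =>
        (PySem.List.pyRange d (N + 1) d).foldl
          (fun sig m => PySem.List.pySetD sig m (PySem.List.pyGetD sig m 0 + d)) sig)
      (List.replicate (N + 1).toNat 0)
  let pk := (PySem.List.pyRange 1 (N + 1) 1).foldl
      (fun pk n =>
        let s := (PySem.List.pyRange 1 (n + 1) 1).foldl
            (fun s j => s + k * PySem.List.pyGetD sig j 0 * PySem.List.pyGetD pk (n - j) 0) 0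
        PySem.List.pySetD pk n (PySem.Int.floordiv s n))
      (PySem.List.pySetD (List.replicate (N + 1).toNat 0) 0 1)
  pk

-- ===== PRECONDITION & SPEC =====
-- On N < 0 the Python A raises IndexError at pk[0] = 1 (the list [0]*(N+1) is empty); B raises there too.
def Pre_compute_pk (N : Int) (k : Int) : Prop := 0 ≤ N
instance (N : Int) (k : Int) : Decidable (Pre_compute_pk N k) := by unfold Pre_compute_pk; infer_instance
def pvWitness_compute_pk : Int × Int := (6, -2)

def Spec_compute_pk (N : Int) (k : Int) (out : List Int) : Prop := out = compute_pk_alt N k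
instance (N : Int) (k : Int) (out : List Int) : Decidable (Spec_compute_pk N k out) := by unfold Spec_compute_pk; infer_instance

-- ===== CLAIM (what is proved, stated in full; the proofs are below) =====
def Claim_equal_compute_pk : Prop := ∀ (N : Int) (k : Int), Dom_compute_pk N k → Pre_compute_pk N k → Spec_compute_pk N k (compute_pk N k)

-- ===== LEMMAS AND PROOFS =====

/-- Sum of divisors of `j`, as an integer. Both sigma computations are proved equal to this. -/
def sumDiv (j : Nat) : Int := ∑ e ∈ j.divisors, (e : Int)
def tailSum (j : Nat) (d : Nat) : Int :=
  ∑ e ∈ j.divisors.filter (fun e => d ≤ e ∧ e * e ≤ j),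
    ((e : Int) + if e ≠ j / e then ((j / e : Nat) : Int) else 0)

lemma sigma1Go_spec (j : Nat) (hj : 1 ≤ j) :
    ∀ (fuel : Nat) (d : Nat) (s : Int), 1 ≤ d → j < d + fuel →
      sigma1Go (j : Int) s (d : Int) fuel = s + tailSum j d := by
  intro fuel
  induction fuel with
  | zero =>
    intro d s hd hlt
    have hempty : j.divisors.filter (fun e => d ≤ e ∧ e * e ≤ j) = ∅ := by
      apply Finset.filter_eq_empty_iff.mpr
      intro e he
      have he1 : 1 ≤ e := Nat.pos_of_mem_divisors he
      intro hc
      nlinarith [hc.1, hc.2]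
    simp [sigma1Go, tailSum, hempty]
  | succ fuel ih =>
    intro d s hd hlt
    show sigma1Go (j : Int) s (d : Int) (fuel + 1) = s + tailSum j d
    rw [sigma1Go]
    by_cases hcond : (d : Int) * (d : Int) ≤ (j : Int)
    · rw [if_pos hcond]
      have hdd : d * d ≤ j := by exact_mod_cast hcond
      have hcast : (d : Int) + 1 = ((d + 1 : Nat) : Int) := by push_cast; ring
      rw [hcast, ih (d+1) _ (by omega) (by omega)]
      have herase : j.divisors.filter (fun e => d + 1 ≤ e ∧ e * e ≤ j)
          = (j.divisors.filter (fun e => d ≤ e ∧ e * e ≤ j)).erase d := by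
        ext e
        simp only [Finset.mem_filter, Finset.mem_erase]
        constructor
        · rintro ⟨h1, h2, h3⟩; exact ⟨by omega, h1, by omega, h3⟩
        · rintro ⟨h0, h1, h2, h3⟩; exact ⟨h1, by omega, h3⟩
      by_cases hdvd : (d : Int) ∣ (j : Int)
      · have hdvdn : d ∣ j := by exact_mod_cast hdvd
        rw [if_pos ((PySem.Int.mod_eq_zero_iff_dvd _ _).mpr hdvd)]
        have hfd : PySem.Int.floordiv (j : Int) (d : Int) = ((j / d : Nat) : Int) :=
          PySem.Int.floordiv_natCast j d
        have hdmem : d ∈ j.divisors.filter (fun e => d ≤ e ∧ e * e ≤ j) := by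
          simp [Nat.mem_divisors, hdvdn, hdd]
          omega
        have hsum' : tailSum j d = ((d : Int) + if d ≠ j / d then ((j / d : Nat) : Int) else 0)
            + ∑ x ∈ (j.divisors.filter (fun e => d ≤ e ∧ e * e ≤ j)).erase d,
                ((x : Int) + if x ≠ j / x then ((j / x : Nat) : Int) else 0) := by
          rw [tailSum, ← Finset.add_sum_erase _ _ hdmem]
        rw [hsum', tailSum, herase]
        by_cases hx : d = j / d
        · rw [hfd, if_neg (not_not_intro (by exact_mod_cast hx : (d : Int) = ((j / d : Nat) : Int))),
            if_neg (not_not_intro hx)]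
          ring
        · rw [hfd, if_pos (fun h => hx (by exact_mod_cast h)), if_pos hx]
          ring
      · rw [if_neg (by rw [PySem.Int.mod_eq_zero_iff_dvd]; exact hdvd)]
        have hdvdn : ¬ d ∣ j := by
          intro h; exact hdvd (by exact_mod_cast h)
        have : (j.divisors.filter (fun e => d ≤ e ∧ e * e ≤ j)).erase d
            = j.divisors.filter (fun e => d ≤ e ∧ e * e ≤ j) := by
          apply Finset.erase_eq_of_notMem
          simp [Nat.mem_divisors, hdvdn]
        rw [tailSum, herase, this, tailSum]
    · rw [if_neg hcond]
      have hdd : ¬ d * d ≤ j := by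
        intro h; exact hcond (by exact_mod_cast h)
      have hempty : j.divisors.filter (fun e => d ≤ e ∧ e * e ≤ j) = ∅ := by
        apply Finset.filter_eq_empty_iff.mpr
        intro e he hc
        exact hdd (le_trans (Nat.mul_le_mul hc.1 hc.1) hc.2)
      simp [tailSum, hempty]

lemma tailSum_one (j : Nat) (hj : 1 ≤ j) : tailSum j 1 = sumDiv j := by
  have hfil : j.divisors.filter (fun e => 1 ≤ e ∧ e * e ≤ j)
      = j.divisors.filter (fun e => e * e ≤ j) := by
    apply Finset.filter_congr
    intro e he
    have : 1 ≤ e := Nat.pos_of_mem_divisors he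
    simp [this]
  rw [tailSum, hfil]
  rw [Finset.sum_add_distrib]
  have h2 : (∑ e ∈ j.divisors.filter (fun e => e * e ≤ j),
        if e ≠ j / e then ((j / e : Nat) : Int) else 0)
      = ∑ e ∈ (j.divisors.filter (fun e => e * e ≤ j)).filter (fun e => e ≠ j / e),
          ((j / e : Nat) : Int) := (Finset.sum_filter _ _).symm
  have hff : (j.divisors.filter (fun e => e * e ≤ j)).filter (fun e => e ≠ j / e)
      = j.divisors.filter (fun e => e * e < j) := by
    rw [Finset.filter_filter]
    apply Finset.filter_congr
    intro e he
    rw [Nat.mem_divisors] at he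
    obtain ⟨hdvd, hne⟩ := he
    have he1 : 1 ≤ e := Nat.pos_of_dvd_of_pos hdvd (by omega)
    have hmul : e * (j / e) = j := Nat.mul_div_cancel' hdvd
    constructor
    · rintro ⟨hle, hneq⟩
      rcases lt_or_eq_of_le hle with h | h
      · simpa using h
      · exfalso; apply hneq
        have : e * (j / e) = e * e := by rw [hmul, h]
        exact (Nat.eq_of_mul_eq_mul_left he1 this).symm
    · intro hlt
      refine ⟨le_of_lt hlt, ?_⟩
      intro heq
      rw [← heq] at hmul
      omega
  have hbij : ∑ e ∈ j.divisors.filter (fun e => e * e < j), ((j / e : Nat) : Int)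
      = ∑ e ∈ j.divisors.filter (fun e => j < e * e), (e : Int) := by
    apply Finset.sum_nbij' (i := fun e => j / e) (j := fun e => j / e)
    · intro e he
      rw [Finset.mem_filter, Nat.mem_divisors] at he ⊢
      obtain ⟨⟨hdvd, hne⟩, hlt⟩ := he
      have he1 : 1 ≤ e := Nat.pos_of_dvd_of_pos hdvd (by omega)
      have hmul : e * (j / e) = j := Nat.mul_div_cancel' hdvd
      refine ⟨⟨Nat.div_dvd_of_dvd hdvd, hne⟩, ?_⟩
      have hlt2 : e < j / e := by nlinarith
      nlinarith
    · intro e he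
      rw [Finset.mem_filter, Nat.mem_divisors] at he ⊢
      obtain ⟨⟨hdvd, hne⟩, hlt⟩ := he
      have he1 : 1 ≤ e := Nat.pos_of_dvd_of_pos hdvd (by omega)
      have hmul : e * (j / e) = j := Nat.mul_div_cancel' hdvd
      refine ⟨⟨Nat.div_dvd_of_dvd hdvd, hne⟩, ?_⟩
      have hlt2 : j / e < e := by nlinarith
      nlinarith
    · intro e he
      rw [Finset.mem_filter, Nat.mem_divisors] at he
      exact Nat.div_div_self he.1.1 (by omega)
    · intro e he
      rw [Finset.mem_filter, Nat.mem_divisors] at he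
      exact Nat.div_div_self he.1.1 (by omega)
    · intro e he; rfl
  rw [h2, hff, hbij, sumDiv,
    ← Finset.sum_filter_add_sum_filter_not j.divisors (fun e => e * e ≤ j) (fun e => (e : Int))]
  have hfl : j.divisors.filter (fun e => j < e * e) = j.divisors.filter (fun e => ¬ e * e ≤ j) :=
    Finset.filter_congr (fun e _ => lt_iff_not_ge)
  rw [hfl]

lemma sigma1_eq_sumDiv (j : Nat) (hj : 1 ≤ j) : sigma1 (j : Int) = sumDiv j := by
  have h0 : ((j : Int)).toNat = j := Int.toNat_natCast j
  have := sigma1Go_spec j hj (j + 1) 1 0 (by omega) (by omega)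
  rw [sigma1, h0]
  rw [Nat.cast_one] at this
  rw [this, tailSum_one j hj]
  ring

/-- A's sigma-table loop and B's sieve as standalone folds (definitionally the `sig` lets of the ports). -/
def sigA (N k : Int) (b : Int) : List Int :=
  (PySem.List.pyRange 1 b 1).foldl
    (fun sig j => PySem.List.pySetD sig j (k * sigma1 j))
    (List.replicate (N + 1).toNat 0)
def sigB (N : Int) (b : Int) : List Int :=
  (PySem.List.pyRange 1 b 1).foldl
    (fun sig d =>
      (PySem.List.pyRange d (N + 1) d).foldl
        (fun sig m => PySem.List.pySetD sig m (PySem.List.pyGetD sig m 0 + d)) sig)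
    (List.replicate (N + 1).toNat 0)

lemma sigA_spec (N k : Int) (hN : 0 ≤ N) : ∀ (D : Nat),
    (sigA N k ((D : Int) + 1)).length = (N + 1).toNat ∧
    ∀ (m : Nat), PySem.List.pyGetD (sigA N k ((D : Int) + 1)) (m : Int) 0 =
      if 1 ≤ m ∧ m ≤ D ∧ (m : Int) ≤ N then k * sigma1 (m : Int) else 0 := by
  intro D
  induction D with
  | zero =>
    constructor
    · simp [sigA, PySem.List.pyRange_one_eq_nil (by omega : (1:Int) ≤ 1)]
    · intro m
      rw [if_neg (by omega)]
      simp [sigA, PySem.List.pyRange_one_eq_nil (by omega : (1:Int) ≤ 1), List.getD]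
  | succ D ih =>
    obtain ⟨ihlen, ihget⟩ := ih
    have hsplit : PySem.List.pyRange 1 ((D:Int) + 1 + 1) 1
        = PySem.List.pyRange 1 ((D:Int) + 1) 1 ++ [(D:Int) + 1] :=
      PySem.List.pyRange_one_succ_right (by omega)
    have hstep : sigA N k (((D + 1 : Nat) : Int) + 1)
        = PySem.List.pySetD (sigA N k ((D:Int) + 1)) (((D + 1 : Nat) : Int))
            (k * sigma1 (((D + 1 : Nat)) : Int)) := by
      rw [show ((D + 1 : Nat) : Int) + 1 = (D:Int) + 1 + 1 by push_cast; ring,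
          show ((D + 1 : Nat) : Int) = (D:Int) + 1 by push_cast; ring]
      rw [sigA, sigA, hsplit, List.foldl_append]
      rfl
    rw [hstep]
    constructor
    · rw [PySem.List.length_pySetD, ihlen]
    · intro m
      by_cases hin : (D : Int) + 1 ≤ N
      · have hlen : D + 1 < (sigA N k ((D:Int) + 1)).length := by rw [ihlen]; omega
        rw [PySem.List.pyGetD_pySetD_natCast _ _ _ _ _ hlen]
        by_cases hm : m = D + 1
        · rw [if_pos hm, if_pos (by omega), hm]
        · rw [if_neg hm, ihget m]
          by_cases h1 : 1 ≤ m ∧ m ≤ D ∧ (m : Int) ≤ N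
          · rw [if_pos h1, if_pos (by omega)]
          · rw [if_neg h1, if_neg (by omega)]
      · rw [PySem.List.pySetD_of_nonneg _ _ (by omega),
          List.set_eq_of_length_le (by rw [ihlen]; omega), ihget m]
        by_cases h1 : 1 ≤ m ∧ m ≤ D ∧ (m : Int) ≤ N
        · rw [if_pos h1, if_pos (by omega)]
        · rw [if_neg h1, if_neg (by omega)]

lemma foldl_bump (v : Int) : ∀ (L : List Int) (xs : List Int),
    (∀ i ∈ L, 0 ≤ i) →
    ((L.foldl (fun a i => PySem.List.pySetD a i (PySem.List.pyGetD a i 0 + v)) xs).length = xs.length ∧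
     ∀ (m : Nat), m < xs.length →
      PySem.List.pyGetD (L.foldl (fun a i => PySem.List.pySetD a i (PySem.List.pyGetD a i 0 + v)) xs) (m : Int) 0 =
        PySem.List.pyGetD xs (m : Int) 0 + v * (L.count (m : Int))) := by
  intro L
  induction L with
  | nil => intro xs _; simp
  | cons i L ih =>
    intro xs hpos
    have hi : 0 ≤ i := hpos i (by simp)
    have hIcast : i = ((i.toNat : Nat) : Int) := by omega
    set xs' := PySem.List.pySetD xs i (PySem.List.pyGetD xs i 0 + v) with hxs'
    have hlen' : xs'.length = xs.length := PySem.List.length_pySetD xs i _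
    obtain ⟨hl, hg⟩ := ih xs' (fun t ht => hpos t (by simp [ht]))
    constructor
    · simpa [hlen'] using hl
    · intro m hm
      rw [List.foldl_cons, hg m (by omega)]
      by_cases hcase : i.toNat < xs.length
      · rw [hxs', hIcast, PySem.List.pyGetD_pySetD_natCast xs i.toNat m _ _ hcase]
        by_cases hmi : m = i.toNat
        · rw [if_pos hmi]
          subst hmi
          simp
          ring
        · rw [if_neg hmi]
          have hne : ((i.toNat : Nat) : Int) ≠ (m : Int) := by omega
          simp [List.count_cons, hne]
          exact Or.inl (by omega)
      · have hnoop : xs' = xs := by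
          rw [hxs', PySem.List.pySetD_of_nonneg _ _ hi, List.set_eq_of_length_le (by omega)]
        have hne : i ≠ (m : Int) := by omega
        rw [hnoop]
        simp [List.count_cons, hne]

lemma count_pyRange_step (d b x : Int) (hd : 0 < d) :
    (PySem.List.pyRange d b d).count x = if d ≤ x ∧ x < b ∧ d ∣ x then 1 else 0 := by
  have hmem : x ∈ PySem.List.pyRange d b d ↔ d ≤ x ∧ x < b ∧ d ∣ x - d :=
    PySem.List.mem_pyRange_iff_of_pos hd x
  have hdvd : (d ∣ x - d) ↔ d ∣ x := by
    constructor
    · intro h; have := dvd_add h (dvd_refl d); simpa using this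
    · intro h; exact dvd_sub h (dvd_refl d)
  have hnodup : (PySem.List.pyRange d b d).Nodup := by
    rw [PySem.List.pyRange_of_pos d b hd]
    refine List.Nodup.map ?_ List.nodup_range
    intro a c hac
    simp only at hac
    have h2 : d * (a : Int) = d * (c : Int) := add_left_cancel hac
    have h3 := mul_left_cancel₀ (by omega : d ≠ 0) h2
    exact_mod_cast h3
  by_cases hx : d ≤ x ∧ x < b ∧ d ∣ x
  · rw [if_pos hx]
    exact List.count_eq_one_of_mem hnodup (hmem.mpr ⟨hx.1, hx.2.1, hdvd.mpr hx.2.2⟩)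
  · rw [if_neg hx]
    apply List.count_eq_zero_of_not_mem
    intro hc
    exact hx ⟨(hmem.mp hc).1, (hmem.mp hc).2.1, hdvd.mp (hmem.mp hc).2.2⟩

lemma sigB_spec (N : Int) (hN : 0 ≤ N) : ∀ (D : Nat),
    (sigB N ((D : Int) + 1)).length = (N + 1).toNat ∧
    ∀ (m : Nat), m < (N + 1).toNat →
      PySem.List.pyGetD (sigB N ((D : Int) + 1)) (m : Int) 0 =
        ∑ e ∈ Finset.Icc 1 D, if e ≤ m ∧ e ∣ m then (e : Int) else 0 := by
  intro D
  induction D with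
  | zero =>
    constructor
    · simp [sigB, PySem.List.pyRange_one_eq_nil (by omega : (1:Int) ≤ 1)]
    · intro m hm
      simp [sigB, PySem.List.pyRange_one_eq_nil (by omega : (1:Int) ≤ 1), List.getD]
  | succ D ih =>
    obtain ⟨ihlen, ihget⟩ := ih
    have hsplit : PySem.List.pyRange 1 (((D + 1 : Nat) : Int) + 1) 1
        = PySem.List.pyRange 1 ((D:Int) + 1) 1 ++ [((D + 1 : Nat) : Int)] := by
      rw [show ((D + 1 : Nat) : Int) + 1 = ((D:Int) + 1) + 1 by push_cast; ring]
      rw [PySem.List.pyRange_one_succ_right (by omega)]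
      norm_num
    have hstep : sigB N (((D + 1 : Nat) : Int) + 1)
        = (PySem.List.pyRange ((D + 1 : Nat) : Int) (N + 1) ((D + 1 : Nat) : Int)).foldl
            (fun sig m => PySem.List.pySetD sig m
              (PySem.List.pyGetD sig m 0 + ((D + 1 : Nat) : Int))) (sigB N ((D:Int) + 1)) := by
      rw [sigB, sigB, hsplit, List.foldl_append]
      rfl
    have hbump := foldl_bump ((D + 1 : Nat) : Int)
      (PySem.List.pyRange ((D + 1 : Nat) : Int) (N + 1) ((D + 1 : Nat) : Int))
      (sigB N ((D:Int) + 1))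
      (by intro i hi
          have := (PySem.List.mem_pyRange_iff_of_pos (by push_cast; omega) i).mp hi
          omega)
    obtain ⟨hblen, hbget⟩ := hbump
    constructor
    · rw [hstep, hblen, ihlen]
    · intro m hm
      rw [hstep, hbget m (by omega), ihget m hm,
        count_pyRange_step _ _ _ (by push_cast; omega),
        Finset.sum_Icc_succ_top (by omega : 1 ≤ D + 1)]
      have hmN : (m : Int) < N + 1 := by omega
      by_cases hc : D + 1 ≤ m ∧ (D + 1) ∣ m
      · have hcI : ((D + 1 : Nat) : Int) ≤ (m : Int) ∧ (m : Int) < N + 1 ∧ ((D + 1 : Nat) : Int) ∣ (m : Int) := by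
          refine ⟨by omega, hmN, ?_⟩
          exact_mod_cast hc.2
        rw [if_pos hcI, if_pos hc]
        simp
      · have hcI : ¬ (((D + 1 : Nat) : Int) ≤ (m : Int) ∧ (m : Int) < N + 1 ∧ ((D + 1 : Nat) : Int) ∣ (m : Int)) := by
          intro h
          exact hc ⟨by omega, by exact_mod_cast h.2.2⟩
        rw [if_neg hcI, if_neg hc]
        simp

lemma sigB_final (N : Int) (hN : 0 ≤ N) (m : Nat) (h1 : 1 ≤ m) (h2 : (m : Int) ≤ N) :
    PySem.List.pyGetD (sigB N (N + 1)) (m : Int) 0 = sumDiv m := by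
  have hNc : N + 1 = ((N.toNat : Nat) : Int) + 1 := by omega
  rw [hNc, (sigB_spec N hN N.toNat).2 m (by omega)]
  rw [← Finset.sum_filter]
  have hfil : (Finset.Icc 1 N.toNat).filter (fun e => e ≤ m ∧ e ∣ m) = m.divisors := by
    ext e
    rw [Finset.mem_filter, Finset.mem_Icc, Nat.mem_divisors]
    constructor
    · rintro ⟨⟨he1, he2⟩, he3, he4⟩; exact ⟨he4, by omega⟩
    · rintro ⟨hdvd, hne⟩
      have he1 : 1 ≤ e := Nat.pos_of_dvd_of_pos hdvd (by omega)
      have he2 : e ≤ m := Nat.le_of_dvd (by omega) hdvd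
      refine ⟨⟨he1, by omega⟩, he2, hdvd⟩
  rw [hfil, sumDiv]

lemma sig_pointwise (N k : Int) (hN : 0 ≤ N) :
    ∀ j ∈ PySem.List.pyRange 1 (N + 1) 1,
      PySem.List.pyGetD (sigA N k (N + 1)) j 0 = k * PySem.List.pyGetD (sigB N (N + 1)) j 0 := by
  intro j hj
  rw [PySem.List.mem_pyRange_one] at hj
  have hj' : j = ((j.toNat : Nat) : Int) := by omega
  have hNc : N + 1 = ((N.toNat : Nat) : Int) + 1 := by omega
  rw [hj', sigB_final N hN j.toNat (by omega) (by omega), hNc,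
    (sigA_spec N k hN N.toNat).2 j.toNat, if_pos (by omega),
    sigma1_eq_sumDiv j.toNat (by omega)]

-- ===== VERDICT (by name: the statement is the Claim_ definition above) =====
theorem compute_pk_spec : Claim_equal_compute_pk := by
  intro N k _ hN
  show compute_pk N k = compute_pk_alt N k
  show (PySem.List.pyRange 1 (N + 1) 1).foldl
      (fun pk n =>
        PySem.List.pySetD pk n (PySem.Int.floordiv ((PySem.List.pyRange 1 (n + 1) 1).foldl
            (fun s j => s + PySem.List.pyGetD (sigA N k (N + 1)) j 0 * PySem.List.pyGetD pk (n - j) 0) 0) n))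
      (PySem.List.pySetD (List.replicate (N + 1).toNat 0) 0 1)
    = (PySem.List.pyRange 1 (N + 1) 1).foldl
      (fun pk n =>
        PySem.List.pySetD pk n (PySem.Int.floordiv ((PySem.List.pyRange 1 (n + 1) 1).foldl
            (fun s j => s + k * PySem.List.pyGetD (sigB N (N + 1)) j 0 * PySem.List.pyGetD pk (n - j) 0) 0) n))
      (PySem.List.pySetD (List.replicate (N + 1).toNat 0) 0 1)
  apply PySem.List.foldl_congr_mem
  intro pk n hn
  have hinner : (PySem.List.pyRange 1 (n + 1) 1).foldl
      (fun s j => s + PySem.List.pyGetD (sigA N k (N + 1)) j 0 * PySem.List.pyGetD pk (n - j) 0) 0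
    = (PySem.List.pyRange 1 (n + 1) 1).foldl
      (fun s j => s + k * PySem.List.pyGetD (sigB N (N + 1)) j 0 * PySem.List.pyGetD pk (n - j) 0) 0 := by
    apply PySem.List.foldl_congr_mem
    intro s j hj
    rw [PySem.List.mem_pyRange_one] at hn hj
    have hmem : j ∈ PySem.List.pyRange 1 (N + 1) 1 := by
      rw [PySem.List.mem_pyRange_one]; omega
    rw [sig_pointwise N k hN j hmem]
  rw [hinner]
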